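-- pv_equiv track=rewrite | github.com/talavis/advent-of-code | 2025/6.py | calc
-- ===== SOURCE A (Python) =====
-- def calc(data):
--     data = [row.split() for row in data if row]
--     ans = 0
--     for i in range(len(data[0])):
--         col = [int(row[i]) for row in data[:-1]]
--         if data[-1][i] == "+":
--             tot = sum(col)
--             ans += tot
--
--         else:
--             tot = 1
--             for val in col:
--                 tot *= val
--             ans += tot
--     return ans
-- ===== SOURCE B (Python) =====
-- def calc(data):
--     # Streaming single pass: hold one row in flight; maintain running per-column
--     # sum and product accumulators; the row left in hand at the end is the
--     # operator row, which selects between the two accumulators.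
--     sums = prods = pending = None
--     for row in data:
--         if not row:
--             continue
--         parts = row.split()
--         if pending is not None:
--             if sums is None:
--                 sums = [0] * len(pending)
--                 prods = [1] * len(pending)
--             vals = [int(v) for v in pending[:len(sums)]]
--             sums = [s + v for s, v in zip(sums, vals)]
--             prods = [p * v for p, v in zip(prods, vals)]
--         pending = parts
--     if sums is None:
--         sums = [0] * len(pending)
--         prods = [1] * len(pending)
--     return sum(s if op == "+" else p for op, s, p in zip(pending, sums, prods))
-- ===== Notes on version B (the rewrite author's own statement) =====
-- stated objective: alternative
-- what changed: A loops over column indices and rebuilds each column by re-indexing every row per column (nested column-major loops); B makes one streaming row-major pass that holds a single row in flight and updates running per-column sum and product accumulators, never materializing any column, then selects sum or product per column with the operator row left in hand at the end.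
import Mathlib
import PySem

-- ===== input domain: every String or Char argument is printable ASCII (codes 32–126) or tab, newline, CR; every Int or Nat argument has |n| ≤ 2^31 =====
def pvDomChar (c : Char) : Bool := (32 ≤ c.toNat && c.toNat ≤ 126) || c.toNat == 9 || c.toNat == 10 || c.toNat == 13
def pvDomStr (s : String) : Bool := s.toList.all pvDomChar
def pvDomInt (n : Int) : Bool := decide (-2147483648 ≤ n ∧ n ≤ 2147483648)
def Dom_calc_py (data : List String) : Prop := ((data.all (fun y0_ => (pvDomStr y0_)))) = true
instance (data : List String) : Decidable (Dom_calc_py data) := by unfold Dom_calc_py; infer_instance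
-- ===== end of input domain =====

-- B replaces A's column-indexed nested loops (rebuilding each column by re-scanning all
-- rows) with one streaming pass that holds one row in flight and maintains running
-- per-column sum and product accumulators; no columns are materialized (objective: alternative).

-- ===== PORT A =====
def calc_py (data : List String) : Int :=
  let rows := (data.filter (fun r => !(r == ""))).map PySem.Str.split₀
  let first := (PySem.List.pyGet? rows 0).getD []
  (PySem.List.pyRange 0 (first.length : Int) 1).foldl
    (fun ans i =>
      let col := (PySem.List.slice rows none (some (-1))).map
        (fun row => (((PySem.List.pyGet? row i).getD "") |> PySem.Int.ofStr?).getD 0)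
      if ((PySem.List.pyGet? ((PySem.List.pyGet? rows (-1)).getD []) i).getD "") = "+" then
        ans + col.sum
      else
        ans + col.foldl (· * ·) 1)
    0

-- ===== PORT B =====
-- streaming pass: state = (running column sums?, running column products?, row in flight?)
def calc_py_alt (data : List String) : Int :=
  let st := data.foldl
    (fun (st : Option (List Int) × Option (List Int) × Option (List String)) row =>
      if row = "" then st
      else
        let parts := PySem.Str.split₀ row
        match st with
        | (sums?, prods?, none) => (sums?, prods?, some parts)
        | (sums?, prods?, some pending) =>
          let sums := sums?.getD (List.replicate pending.length 0)
          let prods := prods?.getD (List.replicate pending.length 1)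
          let vals := (pending.take sums.length).map (fun v => (PySem.Int.ofStr? v).getD 0)
          (some ((sums.zip vals).map (fun sv => sv.1 + sv.2)),
           some ((prods.zip vals).map (fun pv => pv.1 * pv.2)),
           some parts))
    ((none, none, none) : Option (List Int) × Option (List Int) × Option (List String))
  let pending := st.2.2.getD []
  let sums := st.1.getD (List.replicate pending.length 0)
  let prods := st.2.1.getD (List.replicate pending.length 1)
  (pending.zip (sums.zip prods)).foldl
    (fun acc x => acc + (if x.1 = "+" then x.2.1 else x.2.2)) 0

-- ===== PRECONDITION & SPEC =====
-- Pre_ excludes exactly the inputs where A raises: no non-empty line (data[0] IndexError),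
-- a line shorter than the first one (IndexError), or a non-integer token in one of the
-- first len(first-line) fields of a numeric line (ValueError).
def Pre_calc_py (data : List String) : Prop :=
  let rows := (data.filter (fun r => !(r == ""))).map PySem.Str.split₀
  rows ≠ [] ∧ (∀ r ∈ rows, rows.headI.length ≤ r.length) ∧
    (∀ r ∈ rows.dropLast, ∀ t ∈ r.take rows.headI.length, PySem.Int.ofStr? t ≠ none)
instance (data : List String) : Decidable (Pre_calc_py data) := by unfold Pre_calc_py; infer_instance

def pvWitness_calc_py : List String := ["1 2 3", "4 5 6", "+ * +"]

def Spec_calc_py (data : List String) (out : Int) : Prop := out = calc_py_alt data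
instance (data : List String) (out : Int) : Decidable (Spec_calc_py data out) := by unfold Spec_calc_py; infer_instance

-- ===== CLAIM (what is proved, stated in full; the proofs are below) =====
def Claim_equal_calc_py : Prop := ∀ (data : List String), Dom_calc_py data → Pre_calc_py data → Spec_calc_py data (calc_py data)

-- ===== LEMMAS AND PROOFS =====

def pvParse (t : String) : Int := (PySem.Int.ofStr? t).getD 0
def pvCol (nums : List (List String)) (k : Nat) : List Int :=
  nums.map (fun r => pvParse (r[k]?.getD ""))
-- the running accumulators after processing the numeric rows `nums` (n columns)
def pvSv (n : Nat) (nums : List (List String)) : List Int :=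
  (List.range n).map (fun k => (pvCol nums k).sum)
def pvPv (n : Nat) (nums : List (List String)) : List Int :=
  (List.range n).map (fun k => (pvCol nums k).foldl (· * ·) 1)
-- B's loop body on already-split rows, named for the proofs
def pvG (st : Option (List Int) × Option (List Int) × Option (List String))
    (parts : List String) : Option (List Int) × Option (List Int) × Option (List String) :=
  match st with
  | (sums?, prods?, none) => (sums?, prods?, some parts)
  | (sums?, prods?, some pending) =>
    let sums := sums?.getD (List.replicate pending.length 0)
    let prods := prods?.getD (List.replicate pending.length 1)
    let vals := (pending.take sums.length).map (fun v => (PySem.Int.ofStr? v).getD 0)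
    (some ((sums.zip vals).map (fun sv => sv.1 + sv.2)),
     some ((prods.zip vals).map (fun pv => pv.1 * pv.2)),
     some parts)
-- the common per-column value both programs compute
def pvAns (ops : List String) (D : List (List String)) (n : Nat) : Int :=
  ((List.range n).map (fun k =>
    if ops[k]?.getD "" = "+" then (pvCol D k).sum else (pvCol D k).foldl (· * ·) 1)).sum

lemma pvSv_nil (n : Nat) : pvSv n [] = List.replicate n 0 := by
  simp [pvSv, pvCol, List.map_const']

lemma pvPv_nil (n : Nat) : pvPv n [] = List.replicate n 1 := by
  simp [pvPv, pvCol, List.map_const']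

lemma pvG_step (n : Nat) (nums : List (List String)) (r parts : List String)
    (hr : n ≤ r.length) :
    pvG (some (pvSv n nums), some (pvPv n nums), some r) parts
      = (some (pvSv n (nums ++ [r])), some (pvPv n (nums ++ [r])), some parts) := by
  have hS : (pvSv n nums).length = n := by simp [pvSv]
  have hP : (pvPv n nums).length = n := by simp [pvPv]
  unfold pvG
  simp only [Option.getD_some, Prod.mk.injEq, Option.some.injEq]
  refine ⟨?_, ?_, trivial⟩
  · apply List.ext_getElem
    · simp [pvSv, hS]; omega
    · intro k hk hk'
      have hkn : k < n := by simpa [pvSv] using hk'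
      have hkr : k < r.length := by omega
      simp [pvSv, pvCol, List.getElem_zip, hS, hkn, hkr, pvParse,
        List.getElem?_eq_getElem, List.sum_append]
  · apply List.ext_getElem
    · simp [pvPv, hP, hS]; omega
    · intro k hk hk'
      have hkn : k < n := by simpa [pvPv] using hk'
      have hkr : k < r.length := by omega
      simp [pvPv, pvCol, List.getElem_zip, hP, hS, hkn, hkr, pvParse,
        List.getElem?_eq_getElem, List.foldl_append]

lemma pvG_init (r parts : List String) :
    pvG (none, none, some r) parts
      = (some (pvSv r.length [r]), some (pvPv r.length [r]), some parts) := by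
  rw [show pvG (none, none, some r) parts
      = pvG (some (pvSv r.length []), some (pvPv r.length []), some r) parts from by
    simp [pvG, pvSv_nil, pvPv_nil]]
  simpa using pvG_step r.length [] r parts (le_refl _)

lemma pvG_inv (n : Nat) : ∀ (more nums : List (List String)) (r : List String),
    n ≤ r.length → (∀ x ∈ more, n ≤ x.length) →
    more.foldl pvG (some (pvSv n nums), some (pvPv n nums), some r)
      = (some (pvSv n (nums ++ (r :: more).dropLast)),
         some (pvPv n (nums ++ (r :: more).dropLast)),
         some ((r :: more).getLast (by simp))) := by
  intro more
  induction more with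
  | nil => intro nums r _ _; simp
  | cons m ms ih =>
    intro nums r hr hmore
    have h2 : (r :: m :: ms).getLast (by simp) = (m :: ms).getLast (by simp) := by
      rw [List.getLast_cons]
    rw [List.foldl_cons, pvG_step n nums r m hr,
      ih (nums ++ [r]) m (hmore m (by simp)) (fun x hx => hmore x (by simp [hx])),
      show (r :: m :: ms).dropLast = r :: (m :: ms).dropLast from rfl, h2,
      List.append_assoc]
    rfl

-- B's fold over raw lines equals pvG folded over the split non-empty lines
lemma pvBridge (data : List String)
    (s : Option (List Int) × Option (List Int) × Option (List String)) :
    data.foldl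
      (fun (st : Option (List Int) × Option (List Int) × Option (List String)) row =>
        if row = "" then st
        else
          let parts := PySem.Str.split₀ row
          match st with
          | (sums?, prods?, none) => (sums?, prods?, some parts)
          | (sums?, prods?, some pending) =>
            let sums := sums?.getD (List.replicate pending.length 0)
            let prods := prods?.getD (List.replicate pending.length 1)
            let vals := (pending.take sums.length).map (fun v => (PySem.Int.ofStr? v).getD 0)
            (some ((sums.zip vals).map (fun sv => sv.1 + sv.2)),
             some ((prods.zip vals).map (fun pv => pv.1 * pv.2)),
             some parts)) s
    = ((data.filter (fun r => !(r == ""))).map PySem.Str.split₀).foldl pvG s := by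
  have hfun : (fun (st : Option (List Int) × Option (List Int) × Option (List String)) row =>
      if row = "" then st
      else
        let parts := PySem.Str.split₀ row
        match st with
        | (sums?, prods?, none) => (sums?, prods?, some parts)
        | (sums?, prods?, some pending) =>
          let sums := sums?.getD (List.replicate pending.length 0)
          let prods := prods?.getD (List.replicate pending.length 1)
          let vals := (pending.take sums.length).map (fun v => (PySem.Int.ofStr? v).getD 0)
          (some ((sums.zip vals).map (fun sv => sv.1 + sv.2)),
           some ((prods.zip vals).map (fun pv => pv.1 * pv.2)),
           some parts))
      = (fun st row => if row = "" then st else pvG st (PySem.Str.split₀ row)) := by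
    funext st row
    by_cases h : row = "" <;> simp [h, pvG]
  rw [hfun]
  induction data generalizing s with
  | nil => rfl
  | cons row rest ih =>
    simp only [List.foldl_cons, List.filter_cons]
    by_cases h : row = ""
    · simp [h, ih]
    · simp [h, ih]

lemma zip_map_range {α β : Type} (ops : List α) (c : Nat → β) (n : Nat)
    (h : n ≤ ops.length) (d : α) :
    ops.zip ((List.range n).map c) = (List.range n).map (fun k => (ops[k]?.getD d, c k)) := by
  apply List.ext_getElem
  · simp; omega
  · intro k hk hk'
    simp at hk'
    have : k < ops.length := by omega
    simp [List.getElem_zip, this]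

lemma pvB_final (ops : List String) (D : List (List String)) (n : Nat) (h : n ≤ ops.length) :
    (ops.zip ((pvSv n D).zip (pvPv n D))).foldl
      (fun acc x => acc + (if x.1 = "+" then x.2.1 else x.2.2)) 0
    = pvAns ops D n := by
  rw [show (pvSv n D).zip (pvPv n D)
      = (List.range n).map (fun k => ((pvCol D k).sum, (pvCol D k).foldl (· * ·) 1)) from by
    simp [pvSv, pvPv, List.zip_map']]
  rw [zip_map_range ops _ n h ""]
  rw [PySem.List.foldl_add]
  simp [pvAns, List.map_map, Function.comp_def]

-- B's whole computation on split rows r0 :: rest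
lemma pvAlt_char (r0 : List String) (rest : List (List String))
    (hlen : ∀ r ∈ r0 :: rest, r0.length ≤ r.length) :
    (let st := (r0 :: rest).foldl pvG (none, none, none)
     let pending := st.2.2.getD []
     let sums := st.1.getD (List.replicate pending.length 0)
     let prods := st.2.1.getD (List.replicate pending.length 1)
     (pending.zip (sums.zip prods)).foldl
       (fun acc x => acc + (if x.1 = "+" then x.2.1 else x.2.2)) 0)
    = pvAns ((r0 :: rest).getLast (by simp)) ((r0 :: rest).dropLast) r0.length := by
  have hfirst : (r0 :: rest).foldl pvG (none, none, none)
      = rest.foldl pvG (none, none, some r0) := rfl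
  have hops : r0.length ≤ ((r0 :: rest).getLast (by simp)).length :=
    hlen _ (List.getLast_mem _)
  cases rest with
  | nil =>
    simp only [hfirst, List.foldl_nil, List.getLast_singleton, List.dropLast_singleton]
    simp only [Option.getD_some, Option.getD_none]
    rw [← pvSv_nil r0.length, ← pvPv_nil r0.length]
    exact pvB_final r0 [] r0.length (le_refl _)
  | cons r1 rest' =>
    have h1 : rest'.foldl pvG (pvG (none, none, some r0) r1)
        = (some (pvSv r0.length ((r0 :: r1 :: rest').dropLast)),
           some (pvPv r0.length ((r0 :: r1 :: rest').dropLast)),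
           some ((r0 :: r1 :: rest').getLast (by simp))) := by
      rw [pvG_init]
      rw [pvG_inv r0.length rest' [r0] r1 (hlen r1 (by simp))
        (fun x hx => hlen x (by simp [hx]))]
      rw [show (r0 :: r1 :: rest').dropLast = r0 :: (r1 :: rest').dropLast from rfl,
        show (r0 :: r1 :: rest').getLast (by simp) = (r1 :: rest').getLast (by simp) from by
          rw [List.getLast_cons]]
      rfl
    simp only [hfirst, List.foldl_cons] at h1 ⊢
    rw [h1]
    simp only [Option.getD_some]
    exact pvB_final _ _ _ hops

-- A's whole computation on split rows r0 :: rest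
lemma pvA_char (r0 : List String) (rest : List (List String))
    (hlen : ∀ r ∈ r0 :: rest, r0.length ≤ r.length) :
    (PySem.List.pyRange 0 ((((PySem.List.pyGet? (r0 :: rest) 0).getD []) : List String).length : Int) 1).foldl
      (fun ans i =>
        let col := (PySem.List.slice (r0 :: rest) none (some (-1))).map
          (fun row => (((PySem.List.pyGet? row i).getD "") |> PySem.Int.ofStr?).getD 0)
        if ((PySem.List.pyGet? (((PySem.List.pyGet? (r0 :: rest) (-1)).getD []) : List String) i).getD "") = "+" then
          ans + col.sum
        else
          ans + col.foldl (· * ·) 1) 0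
    = pvAns ((r0 :: rest).getLast (by simp)) ((r0 :: rest).dropLast) r0.length := by
  have hops : r0.length ≤ ((r0 :: rest).getLast (by simp)).length :=
    hlen _ (List.getLast_mem _)
  have hlast : (PySem.List.pyGet? (r0 :: rest) (-1)).getD []
      = (r0 :: rest).getLast (by simp) := by
    rw [PySem.List.pyGet?_neg_one, List.getLast?_eq_some_getLast (by simp)]
    rfl
  simp only [PySem.List.pyGet?_zero_cons, Option.getD_some, PySem.List.slice_to_neg_one, hlast]
  rw [show (fun (ans i : Int) =>
        let col := ((r0 :: rest).dropLast).map
          (fun row => (((PySem.List.pyGet? row i).getD "") |> PySem.Int.ofStr?).getD 0)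
        if ((PySem.List.pyGet? (((r0 :: rest).getLast (by simp)) : List String) i).getD "") = "+" then
          ans + col.sum
        else
          ans + col.foldl (· * ·) 1)
      = (fun ans i => ans +
          (if ((PySem.List.pyGet? (((r0 :: rest).getLast (by simp)) : List String) i).getD "") = "+" then
            (((r0 :: rest).dropLast).map
              (fun row => (((PySem.List.pyGet? row i).getD "") |> PySem.Int.ofStr?).getD 0)).sum
          else
            (((r0 :: rest).dropLast).map
              (fun row => (((PySem.List.pyGet? row i).getD "") |> PySem.Int.ofStr?).getD 0)).foldl (· * ·) 1))
      from by funext ans i; simp only []; split <;> rfl]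
  rw [PySem.List.foldl_add]
  rw [PySem.List.pyRange_one]
  simp only [List.map_map, Int.sub_zero, Int.toNat_natCast, zero_add]
  unfold pvAns
  congr 1
  apply List.map_congr_left
  intro k hk
  simp only [List.mem_range] at hk
  simp [Function.comp, PySem.List.pyGet?_natCast, pvCol, pvParse]

theorem pv_main (data : List String) (hpre : Pre_calc_py data) :
    calc_py data = calc_py_alt data := by
  obtain ⟨hne, hlen, -⟩ := hpre
  rcases h : (data.filter (fun r => !(r == ""))).map PySem.Str.split₀ with _ | ⟨r0, rest⟩
  · exact absurd h hne
  · rw [h] at hlen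
    have hlen' : ∀ r ∈ r0 :: rest, r0.length ≤ r.length := by simpa using hlen
    unfold calc_py calc_py_alt
    rw [pvBridge, h]
    exact (pvA_char r0 rest hlen').trans (pvAlt_char r0 rest hlen').symm

-- ===== VERDICT (by name: the statement is the Claim_ definition above) =====
theorem calc_py_spec : Claim_equal_calc_py := by
  intro data _ hpre
  unfold Spec_calc_py
  exact pv_main data hpre
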